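-- pv_equiv track=rewrite | github.com/dianaabdirahmanova711-tech/homeworks | lab1/1.task.py | top_k_smallest_unique
-- ===== SOURCE A (Python) =====
-- def top_k_smallest_unique(a,b):
--     unique=[]
--     for i in a:
--         if i not in unique:
--             unique.append(i)
--     j=0
--     while j<len(unique):
--         index=j
--         k=j+1
--         while k<len(unique):
--             if unique[k]<unique[index]:
--                 index=k
--             k+=1
--         temp=unique[j]
--         unique[j]=unique[index]
--         unique[index]=temp
--         j+=1
--     result=set()
--     count=0
--     for i in unique:
--         if count<b:
--             result.add(i)
--             count+=1
--     return result
-- ===== SOURCE B (Python) =====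
-- def top_k_smallest_unique(a, b):
--     return set(sorted(set(a))[:max(b, 0)])
-- ===== Notes on version B (the rewrite author's own statement) =====
-- stated objective: simpler
-- what changed: A's O(n^2) list-membership dedup, hand-written in-place selection sort and counted copy loop are replaced by a one-line set-dedup, built-in sort and slice: set(sorted(set(a))[:max(b, 0)]).
import Mathlib
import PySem

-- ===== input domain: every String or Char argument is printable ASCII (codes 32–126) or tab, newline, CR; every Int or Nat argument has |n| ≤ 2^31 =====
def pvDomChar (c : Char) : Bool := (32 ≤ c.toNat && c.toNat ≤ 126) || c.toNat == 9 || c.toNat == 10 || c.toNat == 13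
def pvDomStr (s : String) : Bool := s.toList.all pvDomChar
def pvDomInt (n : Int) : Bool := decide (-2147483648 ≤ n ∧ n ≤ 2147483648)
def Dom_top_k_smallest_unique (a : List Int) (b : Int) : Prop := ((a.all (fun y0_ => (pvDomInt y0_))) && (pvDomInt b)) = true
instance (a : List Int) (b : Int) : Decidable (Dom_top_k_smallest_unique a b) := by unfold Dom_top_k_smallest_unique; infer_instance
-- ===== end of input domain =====

-- B replaces A's O(n²) list-membership dedup + O(n²) selection sort + counted copy loop by
-- set-based dedup, the built-in sort and a slice (objective: simpler, and asymptotically faster dedup+sort).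

-- ===== PORT A =====
-- inner while loop: scan k = j+1 .. len-1 keeping the index of the smallest element seen
def pvSelInner (u : List Int) (j : Nat) : Nat :=
  (List.range' (j+1) (u.length - (j+1))).foldl
    (fun index k => if u.getD k 0 < u.getD index 0 then k else index) j

-- temp = u[j]; u[j] = u[idx]; u[idx] = temp
def pvSwap (u : List Int) (j idx : Nat) : List Int :=
  (u.set j (u.getD idx 0)).set idx (u.getD j 0)

-- outer while loop of A's selection sort; fuel = number of remaining iterations
def pvSelSort (u : List Int) (j : Nat) : Nat → List Int
  | 0 => u
  | fuel + 1 =>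
    if j < u.length then pvSelSort (pvSwap u j (pvSelInner u j)) (j+1) fuel else u

def top_k_smallest_unique (a : List Int) (b : Int) : List Int :=
  let unique := a.foldl (fun acc i => if acc.contains i then acc else acc ++ [i]) []
  let su := pvSelSort unique 0 unique.length
  (su.foldl (fun (st : PySem.Set Int × Int) i =>
      if st.2 < b then (PySem.Set.add st.1 i, st.2 + 1) else st) (PySem.Set.empty, 0)).1

-- ===== PORT B =====
-- set(sorted(set(a))[:max(b, 0)])
def top_k_smallest_unique_alt (a : List Int) (b : Int) : List Int :=
  PySem.Set.ofList
    (PySem.List.slice (PySem.List.sorted (PySem.Set.ofList a) (fun x => x) false)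
      none (some (max b 0)))

-- ===== PRECONDITION & SPEC =====
def Spec_top_k_smallest_unique (a : List Int) (b : Int) (out : List Int) : Prop := out = top_k_smallest_unique_alt a b
instance (a : List Int) (b : Int) (out : List Int) : Decidable (Spec_top_k_smallest_unique a b out) := by unfold Spec_top_k_smallest_unique; infer_instance

-- ===== CLAIM (what is proved, stated in full; the proofs are below) =====
def Claim_equal_top_k_smallest_unique : Prop := ∀ (a : List Int) (b : Int), Dom_top_k_smallest_unique a b → Spec_top_k_smallest_unique a b (top_k_smallest_unique a b)

-- ===== LEMMAS AND PROOFS =====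

-- the inner fold returns an in-range index whose element is ≤ the start element and ≤ every scanned element
lemma pvSelFold_spec (u : List Int) : ∀ (ks : List Nat) (i0 : Nat), i0 < u.length →
    (∀ k ∈ ks, k < u.length) →
    (ks.foldl (fun index k => if u.getD k 0 < u.getD index 0 then k else index) i0 = i0 ∨
      ks.foldl (fun index k => if u.getD k 0 < u.getD index 0 then k else index) i0 ∈ ks) ∧
    ks.foldl (fun index k => if u.getD k 0 < u.getD index 0 then k else index) i0 < u.length ∧
    u.getD (ks.foldl (fun index k => if u.getD k 0 < u.getD index 0 then k else index) i0) 0 ≤ u.getD i0 0 ∧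
    ∀ k ∈ ks, u.getD (ks.foldl (fun index k => if u.getD k 0 < u.getD index 0 then k else index) i0) 0 ≤ u.getD k 0 := by
  intro ks
  induction ks with
  | nil => intro i0 h0 _; simp [h0]
  | cons k ks ih =>
    intro i0 h0 hks
    simp only [List.foldl_cons]
    by_cases hc : u.getD k 0 < u.getD i0 0
    · simp only [if_pos hc]
      obtain ⟨hmem, hlt, hle, hall⟩ := ih k (hks k (by simp)) (fun x hx => hks x (by simp [hx]))
      refine ⟨?_, hlt, le_trans hle (le_of_lt hc), ?_⟩
      · rcases hmem with h | h
        · exact Or.inr (by rw [h]; exact List.mem_cons_self)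
        · exact Or.inr (List.mem_cons_of_mem _ h)
      · intro x hx
        rcases List.mem_cons.1 hx with rfl | hx'
        · exact hle
        · exact hall x hx'
    · simp only [if_neg hc]
      obtain ⟨hmem, hlt, hle, hall⟩ := ih i0 h0 (fun x hx => hks x (by simp [hx]))
      refine ⟨?_, hlt, hle, ?_⟩
      · rcases hmem with h | h
        · exact Or.inl h
        · exact Or.inr (List.mem_cons_of_mem _ h)
      · intro x hx
        rcases List.mem_cons.1 hx with rfl | hx'
        · exact le_trans hle (not_lt.1 hc)
        · exact hall x hx'

lemma pvSelInner_spec (u : List Int) (j : Nat) (hj : j < u.length) :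
    j ≤ pvSelInner u j ∧ pvSelInner u j < u.length ∧
      ∀ k, j ≤ k → k < u.length → u.getD (pvSelInner u j) 0 ≤ u.getD k 0 := by
  have hks : ∀ k ∈ List.range' (j+1) (u.length - (j+1)), k < u.length := by
    intro k hk
    have := List.mem_range'_1.1 hk
    omega
  obtain ⟨hmem, hlt, hle, hall⟩ :=
    pvSelFold_spec u (List.range' (j+1) (u.length - (j+1))) j hj hks
  unfold pvSelInner
  refine ⟨?_, hlt, ?_⟩
  · rcases hmem with h | h
    · omega
    · have := List.mem_range'_1.1 h; omega
  · intro k hjk hk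
    rcases eq_or_lt_of_le hjk with rfl | hlt'
    · exact hle
    · exact hall k (List.mem_range'_1.2 ⟨by omega, by omega⟩)

lemma pvSwap_length (u : List Int) (j i : Nat) : (pvSwap u j i).length = u.length := by
  simp [pvSwap]

-- moving t[q] to the front and the old head into position q is a permutation
lemma pvConsSetPerm (t : List Int) (q : Nat) (x : Int) (hq : q < t.length) :
    (t[q] :: t.set q x).Perm (x :: t) := by
  have hdec : t.set q x = t.take q ++ x :: t.drop (q+1) := List.set_eq_take_cons_drop x hq
  have hdec0 : t = t.take q ++ t[q] :: t.drop (q+1) := by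
    conv_lhs => rw [← List.set_getElem_self hq]
    exact List.set_eq_take_cons_drop _ hq
  rw [hdec]
  conv_rhs => rw [hdec0]
  exact (List.Perm.cons _ List.perm_middle).trans
    ((List.Perm.swap _ _ _).trans (List.Perm.cons _ List.perm_middle.symm))

-- the suffix from j of the swapped list starts with u[i] and is a permutation of the suffix from j of u
lemma pvSwap_drop_perm (u : List Int) (j i : Nat) (hji : j ≤ i) (hi : i < u.length) :
    ∃ t, (pvSwap u j i).drop j = u.getD i 0 :: t ∧ (u.getD i 0 :: t).Perm (u.drop j) := by
  have hj : j < u.length := lt_of_le_of_lt hji hi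
  have hdj : u.drop j = u[j] :: u.drop (j+1) := List.drop_eq_getElem_cons hj
  have hgi : u.getD i 0 = u[i] := List.getD_eq_getElem u 0 hi
  have hgj : u.getD j 0 = u[j] := List.getD_eq_getElem u 0 hj
  have hswap : (pvSwap u j i).drop j = ((u.drop j).set 0 u[i]).set (i - j) u[j] := by
    unfold pvSwap
    rw [hgi, hgj, List.drop_set, List.drop_set]
    simp [Nat.not_lt.2 hji]
  rcases eq_or_lt_of_le hji with rfl | hlt
  · -- i = j : the swap rewrites u[j] twice with itself
    refine ⟨u.drop (j+1), ?_, ?_⟩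
    · rw [hswap, hgi, hdj]
      rw [Nat.sub_self, List.set_cons_zero, List.set_cons_zero]
    · rw [hgi, hdj]
  · -- j < i : u[i] sits at position q := i - (j+1) inside the tail of u.drop j
    have hqlen : i - (j+1) < (u.drop (j+1)).length := by
      rw [List.length_drop]; omega
    have hidx : j + 1 + (i - (j+1)) = i := by omega
    have ht0q : (u.drop (j+1))[i - (j+1)]'hqlen = u[i] := by
      rw [List.getElem_drop]
      exact getElem_congr rfl hidx (by omega)
    have hij : i - j = (i - (j+1)) + 1 := by omega
    have hset : (pvSwap u j i).drop j
        = u[i] :: (u.drop (j+1)).set (i - (j+1)) u[j] := by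
      rw [hswap, hdj, hij, List.set_cons_zero, List.set_cons_succ]
    refine ⟨(u.drop (j+1)).set (i - (j+1)) u[j], by rw [hset, hgi], ?_⟩
    rw [hgi, hdj, ← ht0q]
    exact pvConsSetPerm (u.drop (j+1)) (i - (j+1)) u[j] hqlen

lemma pvSwap_take (u : List Int) (j i : Nat) (hji : j ≤ i) (_hi : i < u.length) :
    (pvSwap u j i).take j = u.take j := by
  unfold pvSwap
  rw [List.take_set_of_le hji, List.take_set_of_le (le_refl j)]

-- every element of the suffix is ≥ the selected minimum
lemma pvSelInner_min_drop (u : List Int) (j : Nat) (hj : j < u.length) :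
    ∀ y ∈ u.drop j, u.getD (pvSelInner u j) 0 ≤ y := by
  obtain ⟨_, _, hmin⟩ := pvSelInner_spec u j hj
  intro y hy
  obtain ⟨p, hp, hyp⟩ := List.mem_iff_getElem.1 hy
  have hplen : j + p < u.length := by
    have := hp; rw [List.length_drop] at this; omega
  have : (u.drop j)[p] = u[j+p] := List.getElem_drop ..
  rw [this] at hyp
  have := hmin (j+p) (by omega) hplen
  rw [List.getD_eq_getElem u 0 hplen] at this
  omega

-- A's selection sort sorts the suffix and keeps the prefix
lemma pvSelSort_eq_sorted (fuel : Nat) : ∀ (u : List Int) (j : Nat), u.length ≤ j + fuel →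
    pvSelSort u j fuel = u.take j ++ PySem.List.sorted (u.drop j) (fun x => x) false := by
  induction fuel with
  | zero =>
    intro u j hlen
    simp only [Nat.add_zero] at hlen
    rw [pvSelSort, List.take_of_length_le hlen, List.drop_eq_nil_of_le hlen]
    simp [PySem.List.sorted]
  | succ fuel ih =>
    intro u j hlen
    rw [pvSelSort]
    by_cases hj : j < u.length
    · simp only [if_pos hj]
      obtain ⟨hji, hi, _⟩ := pvSelInner_spec u j hj
      set i := pvSelInner u j
      set m := u.getD i 0 with hm
      obtain ⟨t, hdropj, hperm⟩ := pvSwap_drop_perm u j i hji hi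
      have hlen' : (pvSwap u j i).length = u.length := pvSwap_length u j i
      rw [ih (pvSwap u j i) (j+1) (by omega)]
      have hswapdec : pvSwap u j i = u.take j ++ m :: t := by
        conv_lhs => rw [← List.take_append_drop j (pvSwap u j i)]
        rw [pvSwap_take u j i hji hi, hdropj]
      have hjlen : (u.take j).length = j := by
        rw [List.length_take]; omega
      have htake : (pvSwap u j i).take (j+1) = u.take j ++ [m] := by
        rw [hswapdec, List.take_append, hjlen]
        rw [List.take_of_length_le (by omega)]
        congr 1
        have : j + 1 - j = 1 := by omega
        rw [this]
        rfl
      have hdrop1 : (pvSwap u j i).drop (j+1) = t := by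
        rw [hswapdec, List.drop_append, hjlen]
        rw [List.drop_eq_nil_of_le (by omega)]
        have : j + 1 - j = 1 := by omega
        rw [this]
        rfl
      rw [htake, hdrop1]
      -- sorted (u.drop j) = m :: sorted t
      have hsorted : PySem.List.sorted (u.drop j) (fun x => x) false
          = m :: PySem.List.sorted t (fun x => x) false := by
        have h1 : PySem.List.sorted (u.drop j) (fun x => x) false
            = PySem.List.sorted (m :: t) (fun x => x) false :=
          PySem.List.sorted_eq_sorted_of_perm _ _ _ (fun x y h => h) hperm.symm
        rw [h1]
        apply PySem.List.sorted_id_eq_of_perm_of_pairwise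
        · exact List.Perm.cons m (PySem.List.sorted_perm t (fun x => x) false)
        · rw [List.pairwise_cons]
          refine ⟨?_, PySem.List.sorted_pairwise t (fun x => x)⟩
          intro y hy
          have hyt : y ∈ t := (PySem.List.mem_sorted _ _ _ _).1 hy
          have : y ∈ u.drop j := hperm.mem_iff.1 (List.mem_cons_of_mem m hyt)
          exact pvSelInner_min_drop u j hj y this
      rw [hsorted, List.append_assoc]
      simp
    · simp only [if_neg hj]
      have hle : u.length ≤ j := Nat.not_lt.1 hj
      rw [List.take_of_length_le hle, List.drop_eq_nil_of_le hle]
      simp [PySem.List.sorted]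

-- A's counted copy loop takes the first (b - c) elements of a nodup list disjoint from acc
lemma pvTakeLoop_spec (b : Int) : ∀ (s acc : List Int) (c : Int),
    s.Nodup → (∀ i ∈ s, i ∉ acc) →
    (s.foldl (fun (st : PySem.Set Int × Int) i =>
        if st.2 < b then (PySem.Set.add st.1 i, st.2 + 1) else st) (acc, c)).1
      = acc ++ s.take (b - c).toNat := by
  intro s
  induction s with
  | nil => intro acc c _ _; simp
  | cons x t ih =>
    intro acc c hnd hdisj
    have hxacc : x ∉ acc := hdisj x (by simp)
    rw [List.nodup_cons] at hnd
    simp only [List.foldl_cons]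
    by_cases hc : c < b
    · simp only [if_pos hc]
      rw [PySem.Set.add_of_not_mem hxacc]
      rw [ih (acc ++ [x]) (c+1) hnd.2 ?_]
      · have h1 : (b - c).toNat = (b - (c+1)).toNat + 1 := by omega
        rw [h1, List.take_succ_cons, List.append_assoc]
        rfl
      · intro i hi
        simp only [List.mem_append, List.mem_singleton]
        push Not
        exact ⟨hdisj i (by simp [hi]), fun h => hnd.1 (h ▸ hi)⟩
    · simp only [if_neg hc]
      rw [ih acc c hnd.2 (fun i hi => hdisj i (by simp [hi]))]
      have h0 : (b - c).toNat = 0 := by omega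
      simp [h0]

-- A's dedup loop is set(a) (first occurrences in order)
lemma pvDedup_eq_ofList (a : List Int) :
    a.foldl (fun acc i => if acc.contains i then acc else acc ++ [i]) [] = PySem.Set.ofList a := by
  rw [PySem.Set.ofList_eq_foldl]
  apply PySem.List.foldl_congr_mem
  intro acc x _
  simp [PySem.Set.add, PySem.Set.contains]

-- ===== VERDICT (by name: the statement is the Claim_ definition above) =====
theorem top_k_smallest_unique_spec : Claim_equal_top_k_smallest_unique := by
  intro a b _
  unfold Spec_top_k_smallest_unique top_k_smallest_unique top_k_smallest_unique_alt
  simp only [pvDedup_eq_ofList]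
  have hsel : pvSelSort (PySem.Set.ofList a) 0 (PySem.Set.ofList a).length
      = PySem.List.sorted (PySem.Set.ofList a) (fun x => x) false := by
    rw [pvSelSort_eq_sorted (PySem.Set.ofList a).length (PySem.Set.ofList a) 0 (by omega)]
    simp
  have hnodup : (PySem.List.sorted (PySem.Set.ofList a) (fun x => x) false).Nodup :=
    ((PySem.List.sorted_perm (PySem.Set.ofList a) (fun x => x) false).nodup_iff).2
      (PySem.Set.nodup_ofList a)
  rw [hsel, pvTakeLoop_spec b _ PySem.Set.empty 0 hnodup
        (by intro i _; simp [PySem.Set.empty])]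
  have hmax : (max b 0) = ((b.toNat : Nat) : Int) := by omega
  rw [hmax, PySem.List.slice_to_natCast]
  have htN : ((PySem.List.sorted (PySem.Set.ofList a) (fun x => x) false).take b.toNat).Nodup :=
    (List.take_sublist _ _).nodup hnodup
  rw [PySem.Set.ofList_eq_self_of_nodup _ htN]
  have hb0 : b - 0 = b := by omega
  rw [hb0]
  simp [PySem.Set.empty]
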